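-- pv_equiv track=rewrite | github.com/DancingOnAir/LeetcodePythonSolution | string/1946_largest_number_after_mutating_substring.py | maximumNumber1
-- ===== SOURCE A (Python) =====
-- from typing import List
--
-- def maximumNumber1(num: str, change: List[int]) -> str:
--     res = list(num)
--     for i, c in enumerate(num):
--         cur = int(c)
--         if cur < change[cur]:
--             res[i] = str(change[cur])
--             j = i + 1
--             while j < len(num) and int(num[j]) <= change[int(num[j])]:
--                 res[j] = str(change[int(num[j])])
--                 j += 1
--             break
--     return ''.join(res)
-- ===== SOURCE B (Python) =====
-- from typing import List
--
-- def maximumNumber1(num: str, change: List[int]) -> str: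
--     # Three-state automaton driven character by character: 0 = before the mutated
--     # block, 1 = inside it, 2 = after it.  No break, no indices, no slicing,
--     # no in-place mutation of a copied list.
--     out = []
--     state = 0
--     for c in num:
--         d = int(c)
--         m = change[d]
--         if state == 0:
--             if d < m:
--                 out.append(str(m))
--                 state = 1
--             else:
--                 out.append(c)
--         elif state == 1:
--             if d <= m:
--                 out.append(str(m))
--             else:
--                 out.append(c)
--                 state = 2
--         else:
--             out.append(c)
--     return ''.join(out)
-- ===== Notes on version B (the rewrite author's own statement) =====
-- stated objective: alternative
-- what changed: A interleaves a for-loop that mutates a copied char list, an inner while that extends the block, and a break; B is a single-pass three-state automaton (before/inside/after the mutated block) that appends each output piece as it goes, with no break, no nested loop, no indices and no mutation of a result buffer.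
-- outside the precondition, e.g. on maximumNumber1('19x', [9, 8, 7, 6, 5, 4, 3, 2, 1, 0]): A returns '89x', B raises ValueError
import Mathlib
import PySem

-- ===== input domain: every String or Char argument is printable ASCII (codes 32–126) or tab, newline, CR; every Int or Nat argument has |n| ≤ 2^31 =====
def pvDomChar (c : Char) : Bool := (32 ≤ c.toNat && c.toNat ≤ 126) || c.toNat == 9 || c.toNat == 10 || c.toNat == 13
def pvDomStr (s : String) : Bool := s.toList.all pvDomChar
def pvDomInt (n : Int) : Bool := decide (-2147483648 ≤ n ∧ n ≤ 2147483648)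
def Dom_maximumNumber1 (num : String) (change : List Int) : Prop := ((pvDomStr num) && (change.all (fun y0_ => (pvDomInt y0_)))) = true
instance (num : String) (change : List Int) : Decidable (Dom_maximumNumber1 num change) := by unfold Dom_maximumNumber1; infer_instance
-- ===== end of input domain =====

-- B replaces A's mutate-in-place loop with inner while and break by a single-pass
-- three-state automaton fold (before/inside/after the mutated block): an alternative
-- decomposition, same cost.


-- shared tiny helpers: int(c) for a digit char, and change[d] (exact inside Pre_, where 0 ≤ d < len(change))
def pvDigit (c : Char) : Int := (c.toNat : Int) - 48
def pvLook (change : List Int) (d : Int) : Int := change.getD d.toNat 0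

-- ===== PORT A =====
-- the inner 'while j < len(num) and int(num[j]) <= change[int(num[j])]' loop, mutating res in place
def pvAWhile (num : List Char) (change : List Int) (res : List (List Char)) (j : Nat) :
    List (List Char) :=
  if h : j < num.length then
    if pvDigit num[j] ≤ pvLook change (pvDigit num[j]) then
      pvAWhile num change (res.set j (PySem.Int.toChars (pvLook change (pvDigit num[j])))) (j + 1)
    else res
  else res
termination_by num.length - j

-- the outer 'for i, c in enumerate(num)' loop with its break
def pvALoop (num : List Char) (change : List Int) (res : List (List Char)) (i : Nat) :
    List (List Char) :=
  if h : i < num.length then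
    if pvDigit num[i] < pvLook change (pvDigit num[i]) then
      pvAWhile num change (res.set i (PySem.Int.toChars (pvLook change (pvDigit num[i])))) (i + 1)
    else pvALoop num change res (i + 1)
  else res
termination_by num.length - i

def maximumNumber1 (num : String) (change : List Int) : String :=
  String.ofList (PySem.Chars.join []
    (pvALoop num.toList change (num.toList.map (fun c => [c])) 0))

-- ===== PORT B =====
-- one automaton step: acc = (out pieces so far, state 0/1/2)
def pvBStep (change : List Int) (acc : List (List Char) × Nat) (c : Char) :
    List (List Char) × Nat :=
  let d := pvDigit c
  let m := pvLook change d
  if acc.2 = 0 then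
    if d < m then (acc.1 ++ [PySem.Int.toChars m], 1) else (acc.1 ++ [[c]], 0)
  else if acc.2 = 1 then
    if d ≤ m then (acc.1 ++ [PySem.Int.toChars m], 1) else (acc.1 ++ [[c]], 2)
  else (acc.1 ++ [[c]], 2)

def maximumNumber1_alt (num : String) (change : List Int) : String :=
  String.ofList (PySem.Chars.join [] (num.toList.foldl (pvBStep change) ([], 0)).1)

-- ===== PRECONDITION & SPEC =====
-- Pre_ excludes inputs where the Python A raises (a non-digit char fed to int(), or a digit
-- with no entry in change → IndexError).  It also excludes some inputs on which A returns:
-- A's break stops validation, so garbage after the mutated block is never int()-ed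
-- (e.g. "19x" with change = [9,8,...,0], where A returns "89x" and B raises ValueError);
-- B's automaton inspects every character, so Pre_ demands the whole string be well-formed.
def Pre_maximumNumber1 (num : String) (change : List Int) : Prop :=
  (num.toList.all (fun c =>
    c.isDigit &&
      (PySem.Int.ofStr? (String.ofList [c])).getD (Int.ofNat change.length)
        < Int.ofNat change.length)) = true
instance (num : String) (change : List Int) : Decidable (Pre_maximumNumber1 num change) := by
  unfold Pre_maximumNumber1; infer_instance
def pvWitness_maximumNumber1 : String × List Int :=
  ("132", [0, 9, 2, 3, 4, 5, 6, 7, 8, 9])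

def Spec_maximumNumber1 (num : String) (change : List Int) (out : String) : Prop :=
  out = maximumNumber1_alt num change
instance (num : String) (change : List Int) (out : String) :
    Decidable (Spec_maximumNumber1 num change out) := by unfold Spec_maximumNumber1; infer_instance

-- ===== CLAIM (what is proved, stated in full; the proofs are below) =====
def Claim_equal_maximumNumber1 : Prop :=
  ∀ (num : String) (change : List Int), Dom_maximumNumber1 num change →
    Pre_maximumNumber1 num change →
    Spec_maximumNumber1 num change (maximumNumber1 num change)

-- ===== LEMMAS AND PROOFS =====

-- proof-only boundary functions: first strictly-improving index, end of the non-hurting block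
def pvBFind (num : List Char) (change : List Int) (i : Nat) : Nat :=
  if h : i < num.length then
    if pvLook change (pvDigit num[i]) ≤ pvDigit num[i] then pvBFind num change (i + 1) else i
  else i
termination_by num.length - i

def pvBExtend (num : List Char) (change : List Int) (i : Nat) : Nat :=
  if h : i < num.length then
    if pvDigit num[i] ≤ pvLook change (pvDigit num[i]) then pvBExtend num change (i + 1) else i
  else i
termination_by num.length - i

theorem pvBFind_le (num : List Char) (change : List Int) (i : Nat) (h : i ≤ num.length) :
    pvBFind num change i ≤ num.length := by
  unfold pvBFind
  split
  · split
    · exact pvBFind_le num change (i + 1) (by omega)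
    · omega
  · omega
termination_by num.length - i

theorem pvBFind_ge (num : List Char) (change : List Int) (i : Nat) :
    i ≤ pvBFind num change i := by
  unfold pvBFind
  split
  · split
    · have := pvBFind_ge num change (i + 1); omega
    · omega
  · omega
termination_by num.length - i

theorem pvBExtend_ge (num : List Char) (change : List Int) (i : Nat) :
    i ≤ pvBExtend num change i := by
  unfold pvBExtend
  split
  · split
    · have := pvBExtend_ge num change (i + 1); omega
    · omega
  · omega
termination_by num.length - i

-- setting inside the kept prefix:  (res.set j v).take (j+1) = res.take j ++ [v]
theorem pv_take_set_succ {α : Type} (res : List α) (j : Nat) (v : α) (h : j < res.length) :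
    (res.set j v).take (j + 1) = res.take j ++ [v] := by
  induction res generalizing j with
  | nil => simp at h
  | cons a t ih =>
    cases j with
    | zero => simp
    | succ j => simpa using ih j (by simpa using h)

theorem pv_join_nil_flatten (l : List (List Char)) : PySem.Chars.join [] l = l.flatten := by
  induction l with
  | nil => rfl
  | cons a t ih =>
    cases t with
    | nil => simp [PySem.Chars.join_singleton]
    | cons b r => simpa [PySem.Chars.join_cons_cons] using congrArg (a ++ ·) ih

theorem pv_flatten_singletons (l : List Char) : (l.map (fun c => ([c] : List Char))).flatten = l := by
  induction l with
  | nil => rfl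
  | cons a t ih => simp [ih]

-- A's inner while equals: positions [j, pvBExtend j) replaced by the mapped digits.
theorem pvAWhile_eq (num : List Char) (change : List Int) (j : Nat)
    (res : List (List Char)) (hres : res.length = num.length) :
    pvAWhile num change res j =
      res.take j
        ++ (((num.drop j).take (pvBExtend num change j - j)).map
              (fun c => PySem.Int.toChars (pvLook change (pvDigit c))))
        ++ res.drop (pvBExtend num change j) := by
  have heq : pvBExtend num change j = if h : j < num.length then
      (if pvDigit num[j] ≤ pvLook change (pvDigit num[j]) then pvBExtend num change (j + 1) else j)
      else j := by
    conv_lhs => rw [pvBExtend]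
  rw [pvAWhile]
  split
  · next h =>
    rw [dif_pos h] at heq
    split
    · next hc =>
      rw [if_pos hc] at heq
      have hset : (res.set j (PySem.Int.toChars (pvLook change (pvDigit num[j])))).length
          = num.length := by simp [hres]
      rw [pvAWhile_eq num change (j + 1) _ hset, heq]
      have hj1 : j + 1 ≤ pvBExtend num change (j + 1) := pvBExtend_ge num change (j + 1)
      have hjr : j < res.length := by omega
      rw [pv_take_set_succ res j _ hjr]
      rw [List.drop_set, if_pos (by omega)]
      have hslice : (num.drop j).take (pvBExtend num change (j + 1) - j)
          = num[j] :: (num.drop (j + 1)).take (pvBExtend num change (j + 1) - (j + 1)) := by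
        rw [List.drop_eq_getElem_cons h, List.take_cons (by omega)]
        congr 1
      rw [hslice]
      simp
    · next hc =>
      rw [if_neg hc] at heq
      rw [heq]
      simp
  · next h =>
    rw [dif_neg h] at heq
    rw [heq]
    simp [List.take_of_length_le (by omega : res.length ≤ j),
          List.drop_of_length_le (by omega : res.length ≤ j)]
termination_by num.length - j

-- A's outer loop equals: find the first improvable index with pvBFind, then run the while.
theorem pvALoop_eq (num : List Char) (change : List Int) (i : Nat) (res : List (List Char)) :
    pvALoop num change res i =
      if h : pvBFind num change i < num.length then
        pvAWhile num change
          (res.set (pvBFind num change i)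
            (PySem.Int.toChars (pvLook change (pvDigit num[pvBFind num change i]))))
          (pvBFind num change i + 1)
      else res := by
  have heq : pvBFind num change i = if h : i < num.length then
      (if pvLook change (pvDigit num[i]) ≤ pvDigit num[i] then pvBFind num change (i + 1) else i)
      else i := by
    conv_lhs => rw [pvBFind]
  rw [pvALoop]
  split
  · next h =>
    rw [dif_pos h] at heq
    split
    · next hc =>
      rw [if_neg (by omega)] at heq
      simp only [heq]
      rw [dif_pos h]
    · next hc =>
      rw [if_pos (by omega)] at heq
      rw [pvALoop_eq num change (i + 1) res]
      simp only [heq]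
  · next h =>
    rw [dif_neg h] at heq
    rw [dif_neg (by omega)]
termination_by num.length - i

-- B's automaton from state 2: every remaining char is emitted unchanged.
theorem pvBState2 (change : List Int) (cs : List Char) (out : List (List Char)) :
    cs.foldl (pvBStep change) (out, 2) = (out ++ cs.map (fun c => [c]), 2) := by
  induction cs generalizing out with
  | nil => simp
  | cons c t ih =>
    simp only [List.foldl_cons, pvBStep]
    norm_num
    rw [ih]
    simp

-- B's automaton from state 1 on the suffix num.drop j equals the extend-block closed form.
theorem pvBState1 (num : List Char) (change : List Int) (j : Nat) (hj : j ≤ num.length)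
    (out : List (List Char)) :
    (num.drop j).foldl (pvBStep change) (out, 1) =
      (out ++ ((num.drop j).take (pvBExtend num change j - j)).map
                (fun c => PySem.Int.toChars (pvLook change (pvDigit c)))
           ++ (num.drop (pvBExtend num change j)).map (fun c => [c]),
       if pvBExtend num change j = num.length then 1 else 2) := by
  have heq : pvBExtend num change j = if h : j < num.length then
      (if pvDigit num[j] ≤ pvLook change (pvDigit num[j]) then pvBExtend num change (j + 1) else j)
      else j := by
    conv_lhs => rw [pvBExtend]
  by_cases h : j < num.length
  · rw [dif_pos h] at heq
    rw [List.drop_eq_getElem_cons h, List.foldl_cons]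
    by_cases hc : pvDigit num[j] ≤ pvLook change (pvDigit num[j])
    · rw [if_pos hc] at heq
      have hstep : pvBStep change (out, 1) num[j]
          = (out ++ [PySem.Int.toChars (pvLook change (pvDigit num[j]))], 1) := by
        simp [pvBStep, hc]
      rw [hstep, pvBState1 num change (j + 1) (by omega)]
      have hj1 : j + 1 ≤ pvBExtend num change (j + 1) := pvBExtend_ge num change (j + 1)
      rw [heq]
      have harith : pvBExtend num change (j + 1) - j
          = (pvBExtend num change (j + 1) - (j + 1)) + 1 := by omega
      rw [harith, List.take_succ_cons]
      simp
    · rw [if_neg hc] at heq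
      have hstep : pvBStep change (out, 1) num[j] = (out ++ [[num[j]]], 2) := by
        simp [pvBStep, hc]
      rw [hstep, pvBState2, heq]
      rw [show (num.drop j) = num[j] :: num.drop (j + 1) from List.drop_eq_getElem_cons h]
      simp only [List.map_cons, if_neg (by omega : ¬ j = num.length)]
      simp
  · rw [dif_neg h] at heq
    rw [List.drop_of_length_le (by omega), heq]
    simp [show j = num.length by omega]
termination_by num.length - j

-- B's automaton from state 0 on the suffix num.drop i: unchanged up to pvBFind, then state 1.
theorem pvBState0 (num : List Char) (change : List Int) (i : Nat) (hi : i ≤ num.length)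
    (out : List (List Char)) :
    (num.drop i).foldl (pvBStep change) (out, 0) =
      if h : pvBFind num change i < num.length then
        (num.drop (pvBFind num change i + 1)).foldl (pvBStep change)
          (out ++ ((num.drop i).take (pvBFind num change i - i)).map (fun c => [c])
               ++ [PySem.Int.toChars (pvLook change (pvDigit num[pvBFind num change i]))], 1)
      else (out ++ (num.drop i).map (fun c => [c]), 0) := by
  have heq : pvBFind num change i = if h : i < num.length then
      (if pvLook change (pvDigit num[i]) ≤ pvDigit num[i] then pvBFind num change (i + 1) else i)
      else i := by
    conv_lhs => rw [pvBFind]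
  by_cases h : i < num.length
  · rw [dif_pos h] at heq
    rw [List.drop_eq_getElem_cons h, List.foldl_cons]
    by_cases hc : pvLook change (pvDigit num[i]) ≤ pvDigit num[i]
    · rw [if_pos hc] at heq
      have hnlt : ¬ pvDigit num[i] < pvLook change (pvDigit num[i]) := by omega
      have hstep : pvBStep change (out, 0) num[i] = (out ++ [[num[i]]], 0) := by
        simp [pvBStep, hnlt]
      rw [hstep, pvBState0 num change (i + 1) (by omega)]
      have hge : i + 1 ≤ pvBFind num change (i + 1) := pvBFind_ge num change (i + 1)
      by_cases hlt : pvBFind num change (i + 1) < num.length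
      · rw [dif_pos hlt, heq, dif_pos hlt]
        have harith : pvBFind num change (i + 1) - i
            = (pvBFind num change (i + 1) - (i + 1)) + 1 := by omega
        rw [harith, List.take_succ_cons]
        simp
      · rw [dif_neg hlt, heq, dif_neg hlt]
        simp
        rw [List.drop_eq_getElem_cons
          (show i < (List.map (fun c => ([c] : List Char)) num).length by simpa using h)]
        simp
    · rw [if_neg hc] at heq
      have hlt : pvDigit num[i] < pvLook change (pvDigit num[i]) := by omega
      have hstep : pvBStep change (out, 0) num[i]
          = (out ++ [PySem.Int.toChars (pvLook change (pvDigit num[i]))], 1) := by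
        simp [pvBStep, hlt]
      rw [hstep, heq, dif_pos h]
      simp
  · rw [dif_neg h] at heq
    rw [List.drop_of_length_le (by omega)]
    rw [heq, dif_neg (by omega)]
    simp
termination_by num.length - i

-- ===== VERDICT (by name: the statement is the Claim_ definition above) =====
theorem maximumNumber1_spec : Claim_equal_maximumNumber1 := by
  intro num change _ _
  unfold Spec_maximumNumber1 maximumNumber1 maximumNumber1_alt
  rw [pvALoop_eq]
  have hB0 := pvBState0 num.toList change 0 (Nat.zero_le _) []
  simp only [List.drop_zero, Nat.sub_zero, List.nil_append] at hB0
  rw [hB0]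
  by_cases h : pvBFind num.toList change 0 < num.toList.length
  · rw [dif_pos h, dif_pos h]
    -- A side: expand the while loop
    have hsetlen :
        ((List.map (fun c => ([c] : List Char)) num.toList).set (pvBFind num.toList change 0)
          (PySem.Int.toChars (pvLook change (pvDigit num.toList[pvBFind num.toList change 0])))).length
          = num.toList.length := by simp
    rw [pvAWhile_eq _ _ _ _ hsetlen]
    -- B side: expand the state-1 run
    rw [pvBState1 num.toList change (pvBFind num.toList change 0 + 1) (by omega)]
    have hse : pvBFind num.toList change 0 + 1
        ≤ pvBExtend num.toList change (pvBFind num.toList change 0 + 1) :=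
      pvBExtend_ge _ _ _
    rw [pv_take_set_succ _ _ _ (by simpa using h)]
    rw [List.drop_set, if_pos (by omega)]
    refine congrArg String.ofList ?_
    simp only [pv_join_nil_flatten, List.flatten_append, List.flatten_cons,
      ← List.map_take, ← List.map_drop, pv_flatten_singletons]
  · rw [dif_neg h, dif_neg h]
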